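-- pv_equiv track=rewrite | github.com/Therasdin/Hangman | aihangman_py.py | get_best_letter_from_likely_word
-- ===== SOURCE A (Python) =====
-- def get_best_letter_from_likely_word(word_completion, guessed_letters, words, frequencies):
--     possible = []
--     for w, wt in zip(words, frequencies):
--         if len(w) != len(word_completion):
--             continue
--         match = True
--         for wc, c in zip(word_completion, w):
--             if (wc != '_' and wc != c) or (wc == '_' and c in guessed_letters):
--                 match = False
--                 break
--         if match:
--             possible.append((w, wt))
--     if not possible:
--         return None
--     possible.sort(key=lambda x: x[1], reverse=True)
--     for c in possible[0][0]:
--         if c not in guessed_letters: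
--             return c
--     return None
-- ===== SOURCE B (Python) =====
-- def get_best_letter_from_likely_word(word_completion, guessed_letters, words, frequencies):
--     guessed = set(guessed_letters)
--     best = None
--     for w, wt in zip(words, frequencies):
--         if len(w) == len(word_completion) and all(
--                 (c not in guessed) if wc == '_' else wc == c
--                 for wc, c in zip(word_completion, w)):
--             if best is None or wt > best[1]:
--                 best = (w, wt)
--     if best is None:
--         return None
--     for c in best[0]:
--         if c not in guessed:
--             return c
--     return None
-- ===== Notes on version B (the rewrite author's own statement) =====
-- stated objective: alternative
-- what changed: Replaces A's build-a-list-of-all-matches, stable descending sort and argmax-then-letter-loop with a single pass that keeps the running first-seen maximum-frequency matching word (and a set for guessed-letter membership), then extracts its first unguessed letter.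
import Mathlib
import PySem

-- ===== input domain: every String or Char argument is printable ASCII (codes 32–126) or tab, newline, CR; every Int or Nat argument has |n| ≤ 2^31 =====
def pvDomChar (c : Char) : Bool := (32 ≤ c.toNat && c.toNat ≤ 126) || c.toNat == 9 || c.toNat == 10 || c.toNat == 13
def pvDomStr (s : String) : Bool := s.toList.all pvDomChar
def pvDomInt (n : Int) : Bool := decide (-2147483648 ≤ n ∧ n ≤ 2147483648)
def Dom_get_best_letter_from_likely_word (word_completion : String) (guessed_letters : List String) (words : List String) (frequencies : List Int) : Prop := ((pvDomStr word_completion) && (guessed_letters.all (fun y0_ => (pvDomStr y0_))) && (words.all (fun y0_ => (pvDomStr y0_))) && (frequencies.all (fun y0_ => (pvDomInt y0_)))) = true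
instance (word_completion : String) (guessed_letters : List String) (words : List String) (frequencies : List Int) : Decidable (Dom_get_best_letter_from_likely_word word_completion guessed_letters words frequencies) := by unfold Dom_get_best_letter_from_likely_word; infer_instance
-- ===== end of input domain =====

-- B replaces A's filter-all / stable-sort / argmax pipeline by a single running-max pass
-- with a guessed-letter set (objective: alternative decomposition; return value proved equal).


-- ===== PORT A =====
-- A's inner character loop (with its break): mismatch test in A's branch order.
def pvMatchA (guessed : List String) : List (Char × Char) → Bool
  | [] => true
  | q :: rest =>
    if (q.1 ≠ '_' ∧ q.1 ≠ q.2) ∨ (q.1 = '_' ∧ guessed.contains q.2.toString) then false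
    else pvMatchA guessed rest

-- A's final loop: first character of the chosen word not in guessed_letters.
def pvFirstA (guessed : List String) : List Char → Option String
  | [] => none
  | c :: rest => if guessed.contains c.toString then pvFirstA guessed rest else some c.toString

def get_best_letter_from_likely_word (word_completion : String) (guessed_letters : List String) (words : List String) (frequencies : List Int) : Option String :=
  let possible := (words.zip frequencies).foldl
    (fun acc p =>
      if p.1.toList.length ≠ word_completion.toList.length then acc
      else if pvMatchA guessed_letters (word_completion.toList.zip p.1.toList) then acc ++ [p]
      else acc) ([] : List (String × Int))
  if possible = [] then none
  else
    match PySem.List.sorted possible (fun x => x.2) true with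
    | [] => none   -- unreachable: possible ≠ []
    | m :: _ => pvFirstA guessed_letters m.1.toList

-- ===== PORT B =====
-- B's matching test: length check and one `all` over the zipped characters, against a set.
def pvMatchB (guessed : PySem.Set String) (word_completion : String) (w : String) : Bool :=
  w.toList.length == word_completion.toList.length &&
  (word_completion.toList.zip w.toList).all
    (fun q => if q.1 = '_' then !(PySem.Set.contains guessed q.2.toString) else q.1 == q.2)

-- B's running best: keep the first pair with strictly greatest frequency.
def pvUpd (best : Option (String × Int)) (p : String × Int) : Option (String × Int) :=
  match best with
  | none => some p
  | some b => if p.2 > b.2 then some p else best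

def pvFirstB (guessed : PySem.Set String) : List Char → Option String
  | [] => none
  | c :: rest => if PySem.Set.contains guessed c.toString then pvFirstB guessed rest else some c.toString

def get_best_letter_from_likely_word_alt (word_completion : String) (guessed_letters : List String) (words : List String) (frequencies : List Int) : Option String :=
  let guessed := PySem.Set.ofList guessed_letters
  let best := (words.zip frequencies).foldl
    (fun best p => if pvMatchB guessed word_completion p.1 then pvUpd best p else best)
    (none : Option (String × Int))
  match best with
  | none => none
  | some b => pvFirstB guessed b.1.toList

-- ===== PRECONDITION & SPEC =====
def Spec_get_best_letter_from_likely_word (word_completion : String) (guessed_letters : List String) (words : List String) (frequencies : List Int) (out : Option String) : Prop := out = get_best_letter_from_likely_word_alt word_completion guessed_letters words frequencies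
instance (word_completion : String) (guessed_letters : List String) (words : List String) (frequencies : List Int) (out : Option String) : Decidable (Spec_get_best_letter_from_likely_word word_completion guessed_letters words frequencies out) := by unfold Spec_get_best_letter_from_likely_word; infer_instance

-- ===== CLAIM (what is proved, stated in full; the proofs are below) =====
def Claim_equal_get_best_letter_from_likely_word : Prop := ∀ (word_completion : String) (guessed_letters : List String) (words : List String) (frequencies : List Int), Dom_get_best_letter_from_likely_word word_completion guessed_letters words frequencies → Spec_get_best_letter_from_likely_word word_completion guessed_letters words frequencies (get_best_letter_from_likely_word word_completion guessed_letters words frequencies)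

-- ===== LEMMAS AND PROOFS =====

theorem pv_contains_ofList (g : List String) (s : String) :
    PySem.Set.contains (PySem.Set.ofList g) s = g.contains s := by
  have h := PySem.Set.mem_ofList g s
  by_cases hm : s ∈ g <;> simp [PySem.Set.contains, hm] at h ⊢

theorem pv_matchA_eq (g : List String) (l : List (Char × Char)) :
    pvMatchA g l =
      l.all (fun q => if q.1 = '_' then !(PySem.Set.contains (PySem.Set.ofList g) q.2.toString) else q.1 == q.2) := by
  induction l with
  | nil => rfl
  | cons q t ih =>
    rw [pvMatchA, List.all_cons, pv_contains_ofList]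
    by_cases h1 : q.1 = '_'
    · by_cases h2 : g.contains q.2.toString = true <;> simp [h1, ih]
    · by_cases h2 : q.1 = q.2 <;> simp [h1, h2, ih]

theorem pv_firstA_eq (g : List String) (l : List Char) :
    pvFirstA g l = pvFirstB (PySem.Set.ofList g) l := by
  induction l with
  | nil => rfl
  | cons c t ih => rw [pvFirstA, pvFirstB, pv_contains_ofList]; split_ifs <;> simp [ih]

-- the two loop bodies test the same predicate
theorem pv_body_eq (wc : String) (g : List String) (acc : List (String × Int)) (p : String × Int) :
    (if p.1.toList.length ≠ wc.toList.length then acc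
     else if pvMatchA g (wc.toList.zip p.1.toList) then acc ++ [p] else acc)
    = (if pvMatchB (PySem.Set.ofList g) wc p.1 then acc ++ [p] else acc) := by
  by_cases hl : p.1.toList.length = wc.toList.length
  · have hb : pvMatchB (PySem.Set.ofList g) wc p.1 = pvMatchA g (wc.toList.zip p.1.toList) := by
      rw [pv_matchA_eq, pvMatchB,
        show (p.1.toList.length == wc.toList.length) = true from by simp [hl], Bool.true_and]
    rw [if_neg (fun h => h hl), hb]
  · have hb : pvMatchB (PySem.Set.ofList g) wc p.1 = false := by
      rw [pvMatchB, show (p.1.toList.length == wc.toList.length) = false from by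
          simp only [beq_eq_false_iff_ne, ne_eq]; exact hl,
        Bool.false_and]
    rw [if_pos hl, hb]
    simp

theorem pv_foldl_append_if {α : Type} (p : α → Bool) (l : List α) (acc : List α) :
    l.foldl (fun acc x => if p x then acc ++ [x] else acc) acc = acc ++ l.filter p := by
  induction l generalizing acc with
  | nil => simp
  | cons x t ih => by_cases h : p x <;> simp [h, ih]

theorem pv_foldl_guard_filter {α β : Type} (pb : α → Bool) (f : β → α → β) (l : List α) (init : β) :
    l.foldl (fun s x => if pb x then f s x else s) init = (l.filter pb).foldl f init := by
  induction l generalizing init with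
  | nil => rfl
  | cons x t ih => by_cases h : pb x <;> simp [h, ih]

theorem pv_head?_insertBy (x : String × Int) (l : List (String × Int)) :
    (PySem.List.insertBy (fun a b => decide (b.2 < a.2)) x l).head? =
      some (match l.head? with
            | none => x
            | some m => if x.2 > m.2 then x else m) := by
  cases l with
  | nil => simp [PySem.List.insertBy]
  | cons m t =>
    by_cases h : m.2 < x.2 <;> simp [PySem.List.insertBy, h, gt_iff_lt]

theorem pv_head?_foldl_insertBy (P : List (String × Int)) (acc : List (String × Int))
    (best : Option (String × Int)) (h : acc.head? = best) :
    (P.foldl (fun acc x => PySem.List.insertBy (fun a b => decide (b.2 < a.2)) x acc) acc).head?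
      = P.foldl pvUpd best := by
  induction P generalizing acc best with
  | nil => simpa using h
  | cons x t ih =>
    simp only [List.foldl_cons]
    apply ih
    rw [pv_head?_insertBy, h]
    cases best with
    | none => rfl
    | some b => by_cases hc : x.2 > b.2 <;> simp [pvUpd, hc]

theorem pv_sorted_head (P : List (String × Int)) :
    (PySem.List.sorted P (fun x => x.2) true).head? = P.foldl pvUpd none := by
  rw [PySem.List.sorted_rev_eq_foldl_insertBy]
  exact pv_head?_foldl_insertBy P [] none rfl

-- ===== VERDICT (by name: the statement is the Claim_ definition above) =====
theorem get_best_letter_from_likely_word_spec : Claim_equal_get_best_letter_from_likely_word := by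
  intro wc g ws fs _
  unfold Spec_get_best_letter_from_likely_word
  unfold get_best_letter_from_likely_word get_best_letter_from_likely_word_alt
  simp only [funext (fun acc => funext (pv_body_eq wc g acc)),
    pv_foldl_append_if (fun p : String × Int => pvMatchB (PySem.Set.ofList g) wc p.1),
    pv_foldl_guard_filter (fun p : String × Int => pvMatchB (PySem.Set.ofList g) wc p.1) pvUpd,
    List.nil_append]
  set P := (ws.zip fs).filter (fun p : String × Int => pvMatchB (PySem.Set.ofList g) wc p.1) with hP
  by_cases hnil : P = []
  · rw [if_pos hnil, hnil]
    rfl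
  · rw [if_neg hnil]
    have hs := pv_sorted_head P
    cases hsort : PySem.List.sorted P (fun x => x.2) true with
    | nil => exact absurd ((PySem.List.sorted_eq_nil_iff P (fun x => x.2) true).mp hsort) hnil
    | cons m t =>
      rw [hsort] at hs
      simp only [List.head?_cons] at hs
      rw [← hs]
      exact pv_firstA_eq g m.1.toList
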